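-- pv_equiv track=rewrite | github.com/kunalrustagi08/congenial-fortnight | DSA codes - Python/008_duplicate.py | duplicate_char
-- ===== SOURCE A (Python) =====
-- def duplicate_char(arr):
--
--     d = {i:0 for i in arr}
--
--     for i in arr:
--         if d[i] == 1:
--             return i
--         else:
--             d[i] = 1
--
--     return -1
-- ===== SOURCE B (Python) =====
-- def duplicate_char(arr):
--     # stage 1: group all positions by value (full pass, no early exit)
--     positions = {}
--     for j, v in enumerate(arr):
--         positions.setdefault(v, []).append(j)
--     # stage 2: each value occurring twice or more contributes its second-occurrence index
--     seconds = [idxs[1] for idxs in positions.values() if len(idxs) > 1]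
--     # stage 3: the first character appearing twice sits at the smallest such index
--     return arr[min(seconds)] if seconds else -1
-- ===== Notes on version B (the rewrite author's own statement) =====
-- stated objective: alternative
-- what changed: replaces A's streaming early-return scan over a dict of seen-flags by a staged group-by: one full pass groups every index by its value, then the answer is the element at the minimum of the second-occurrence indices (or -1 if no value repeats)
import Mathlib
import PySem

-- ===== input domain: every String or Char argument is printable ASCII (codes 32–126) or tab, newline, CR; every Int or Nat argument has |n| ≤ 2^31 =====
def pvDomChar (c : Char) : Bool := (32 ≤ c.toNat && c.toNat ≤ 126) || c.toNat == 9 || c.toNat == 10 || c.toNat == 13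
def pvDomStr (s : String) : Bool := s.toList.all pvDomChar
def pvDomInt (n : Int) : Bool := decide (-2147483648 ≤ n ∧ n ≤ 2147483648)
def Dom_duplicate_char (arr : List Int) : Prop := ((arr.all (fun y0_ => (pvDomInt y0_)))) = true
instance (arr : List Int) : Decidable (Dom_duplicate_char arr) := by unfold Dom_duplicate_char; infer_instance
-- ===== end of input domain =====

-- B replaces A's streaming early-return scan with seen-flags by a staged group-by: group all indices by value, then index arr at the minimum second-occurrence index (or -1).


-- ===== PORT A =====
-- the for-loop of A with its early return; d[i] is ported as getD d i 0, exact here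
-- because every element of arr is a key of d (d = {i:0 for i in arr}).
def dupLoopA (d : PySem.Dict Int Int) : List Int → Int
  | [] => -1
  | i :: rest => if d.getD i 0 == 1 then i else dupLoopA (d.insert i 1) rest

def duplicate_char (arr : List Int) : Int :=
  let d := arr.foldl (fun d i => d.insert i 0) PySem.Dict.empty  -- d = {i:0 for i in arr}
  dupLoopA d arr

-- ===== PORT B =====
-- positions = {}; for j, v in enumerate(arr): positions.setdefault(v, []).append(j)
-- seconds = [idxs[1] for idxs in positions.values() if len(idxs) > 1]
-- return arr[min(seconds)] if seconds else -1
-- (setdefault+append = modify v [] (· ++ [j]); idxs[1] with 1 < len(idxs) is getD 1 _ — exact;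
--  min(seconds) is min?, none exactly when seconds is empty; arr[m] via pyGet?, m a valid index)
def duplicate_char_alt (arr : List Int) : Int :=
  let positions := (PySem.List.enumerate arr 0).foldl
      (fun d p => d.modify p.2 [] (fun l => l ++ [p.1])) PySem.Dict.empty
  let seconds := (positions.values.filter (fun idxs => decide (1 < idxs.length))).map
      (fun idxs => idxs.getD 1 0)
  match PySem.List.min? seconds (fun x => x) with
  | none => -1
  | some m => (PySem.List.pyGet? arr m).getD 0

-- ===== PRECONDITION & SPEC =====
def Spec_duplicate_char (arr : List Int) (out : Int) : Prop := out = duplicate_char_alt arr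
instance (arr : List Int) (out : Int) : Decidable (Spec_duplicate_char arr out) := by unfold Spec_duplicate_char; infer_instance

-- ===== CLAIM (what is proved, stated in full; the proofs are below) =====
def Claim_equal_duplicate_char : Prop := ∀ (arr : List Int), Dom_duplicate_char arr → Spec_duplicate_char arr (duplicate_char arr)

-- ===== LEMMAS AND PROOFS =====

-- common specification: first element already seen, tracking the set of seen elements as a list
def firstDup (seen : List Int) : List Int → Int
  | [] => -1
  | x :: rest => if x ∈ seen then x else firstDup (x :: seen) rest

theorem firstDup_congr (s t : List Int) (h : ∀ y, y ∈ s ↔ y ∈ t) :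
    ∀ l, firstDup s l = firstDup t l := by
  intro l
  induction l generalizing s t with
  | nil => rfl
  | cons x rest ih =>
      simp only [firstDup]
      by_cases hx : x ∈ s
      · rw [if_pos hx, if_pos ((h x).mp hx)]
      · rw [if_neg hx, if_neg (fun hm => hx ((h x).mpr hm))]
        exact ih _ _ (by intro y; simp [h y])

theorem dupLoopA_eq_firstDup (l : List Int) (d : PySem.Dict Int Int) (seen : List Int)
    (hinv : ∀ x, x ∈ l → d.getD x 0 = if x ∈ seen then 1 else 0) :
    dupLoopA d l = firstDup seen l := by
  induction l generalizing d seen with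
  | nil => rfl
  | cons x rest ih =>
      simp only [dupLoopA, firstDup]
      have hx := hinv x (by simp)
      by_cases hs : x ∈ seen
      · rw [hx, if_pos hs]; simp [hs]
      · rw [hx, if_neg hs]
        simp only [hs, if_false]
        norm_num
        apply ih
        intro y hy
        rw [PySem.Dict.getD_insert]
        by_cases hyx : y = x
        · simp [hyx]
        · rw [if_neg hyx, hinv y (by simp [hy])]
          simp [List.mem_cons, hyx]

theorem getD_fold_zero (l : List Int) (d : PySem.Dict Int Int)
    (h : ∀ x, d.getD x 0 = 0) :
    ∀ x, (l.foldl (fun d i => d.insert i 0) d).getD x 0 = 0 := by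
  induction l generalizing d with
  | nil => exact h
  | cons a rest ih =>
      intro x
      simp only [List.foldl_cons]
      apply ih
      intro y
      rw [PySem.Dict.getD_insert]
      split <;> simp [h]

-- membership in a prefix, in index form
theorem mem_take_iff (arr : List Int) (j : Nat) (hj : j < arr.length) (x : Int) :
    x ∈ arr.take j ↔ ∃ i, ∃ _ : i < j, ∃ hi : i < arr.length, arr[i] = x := by
  constructor
  · intro hx
    obtain ⟨i, hi, hget⟩ := List.mem_iff_getElem.mp hx
    have hlen : i < j := by
      have := hi; simp [List.length_take] at this; omega
    have hil : i < arr.length := by omega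
    refine ⟨i, hlen, hil, ?_⟩
    rw [← hget]
    simp [List.getElem_take]
  · rintro ⟨i, hij, hil, hget⟩
    apply List.mem_iff_getElem.mpr
    refine ⟨i, by simp [List.length_take]; omega, ?_⟩
    simp [List.getElem_take, hget]

-- the list of positions (as Ints, ascending) at which value v occurs in arr
def occ (arr : List Int) (v : Int) : List Int :=
  ((PySem.List.enumerate arr 0).filter (fun p => p.2 == v)).map (fun p => p.1)

-- the second-occurrence indices, one per value occurring at least twice, in first-occurrence order
def secondsOf (arr : List Int) : List Int :=
  ((PySem.Set.ofList arr).filter (fun v => decide (1 < (occ arr v).length))).map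
    (fun v => (occ arr v).getD 1 0)

theorem mem_occ (arr : List Int) (v x : Int) :
    x ∈ occ arr v ↔ ∃ t, ∃ _ : t < arr.length, x = (t : Int) ∧ arr[t] = v := by
  unfold occ
  simp only [List.mem_map, List.mem_filter, PySem.List.mem_enumerate_iff, beq_iff_eq]
  constructor
  · rintro ⟨p, ⟨⟨k, hk, rfl⟩, hv⟩, hx⟩
    exact ⟨k, hk, by simpa using hx.symm, hv⟩
  · rintro ⟨t, ht, rfl, hv⟩
    exact ⟨((t : Int), arr[t]), ⟨⟨t, ht, by simp⟩, hv⟩, rfl⟩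

theorem occ_pairwise (arr : List Int) (v : Int) : (occ arr v).Pairwise (· < ·) := by
  unfold occ
  rw [List.pairwise_map]
  exact (PySem.List.pairwise_lt_enumerate arr 0).filter _

-- in a strictly ascending list a :: b :: rest, every element is a or at least b
theorem pairwise_second_le {a b : Int} {rest : List Int}
    (h : (a :: b :: rest).Pairwise (· < ·)) :
    ∀ x ∈ a :: b :: rest, x = a ∨ b ≤ x := by
  intro x hx
  rcases List.mem_cons.mp hx with rfl | hx'
  · exact Or.inl rfl
  · right
    rcases List.mem_cons.mp hx' with rfl | hx''
    · exact le_refl _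
    · have hb := (List.pairwise_cons.mp (List.pairwise_cons.mp h).2).1
      exact le_of_lt (hb x hx'')

-- every element of secondsOf is (the Int of) a repeat position
theorem seconds_repeat (arr : List Int) (x : Int) (hx : x ∈ secondsOf arr) :
    ∃ t, ∃ ht : t < arr.length, x = (t : Int) ∧ arr[t] ∈ arr.take t := by
  unfold secondsOf at hx
  obtain ⟨v, hv, hx⟩ := List.mem_map.mp hx
  obtain ⟨-, hlen⟩ := List.mem_filter.mp hv
  rw [decide_eq_true_iff] at hlen
  rcases hocc : occ arr v with _ | ⟨a, _ | ⟨b, rest⟩⟩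
  · rw [hocc] at hlen; simp at hlen
  · rw [hocc] at hlen; simp at hlen
  · have hb : b ∈ occ arr v := by rw [hocc]; simp
    have ha : a ∈ occ arr v := by rw [hocc]; simp
    have hpw : (a :: b :: rest).Pairwise (· < ·) := hocc ▸ occ_pairwise arr v
    have hab : a < b := (List.pairwise_cons.mp hpw).1 b (by simp)
    obtain ⟨t, ht, rfl, hvt⟩ := (mem_occ arr v b).mp hb
    obtain ⟨i, hi, rfl, hvi⟩ := (mem_occ arr v a).mp ha
    have hit : i < t := by exact_mod_cast hab
    refine ⟨t, ht, ?_, ?_⟩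
    · rw [← hx, hocc]; rfl
    · exact (mem_take_iff arr t ht _).mpr ⟨i, hit, hi, by rw [hvi, hvt]⟩

-- every repeat position is bounded below by an element of secondsOf
theorem repeat_seconds (arr : List Int) (s : Nat) (hs : s < arr.length)
    (hrep : arr[s] ∈ arr.take s) :
    ∃ y ∈ secondsOf arr, y ≤ (s : Int) := by
  obtain ⟨i, his, hi, hvi⟩ := (mem_take_iff arr s hs _).mp hrep
  set v := arr[s] with hv
  have hsocc : (s : Int) ∈ occ arr v := (mem_occ arr v _).mpr ⟨s, hs, rfl, rfl⟩
  have hiocc : (i : Int) ∈ occ arr v := (mem_occ arr v _).mpr ⟨i, hi, rfl, hvi⟩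
  have hne : (i : Int) ≠ (s : Int) := by exact_mod_cast Nat.ne_of_lt his
  rcases hocc : occ arr v with _ | ⟨a, _ | ⟨b, rest⟩⟩
  · rw [hocc] at hsocc; simp at hsocc
  · rw [hocc] at hsocc hiocc
    simp at hsocc hiocc
    exact absurd (hiocc.trans hsocc.symm) hne
  · have hpw : (a :: b :: rest).Pairwise (· < ·) := hocc ▸ occ_pairwise arr v
    have hmem : v ∈ PySem.Set.ofList arr :=
      (PySem.Set.mem_ofList arr v).mpr (hv ▸ List.getElem_mem hs)
    have hlen : 1 < (occ arr v).length := by rw [hocc]; simp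
    refine ⟨(occ arr v).getD 1 0, ?_, ?_⟩
    · unfold secondsOf
      exact List.mem_map.mpr ⟨v, List.mem_filter.mpr ⟨hmem, by simpa using hlen⟩, rfl⟩
    · rw [hocc]
      show b ≤ (s : Int)
      rcases pairwise_second_le hpw _ (hocc ▸ hsocc) with hsa | hsb
      · exfalso
        rcases pairwise_second_le hpw _ (hocc ▸ hiocc) with hia | hib
        · exact hne (hia.trans hsa.symm)
        · have hab : a < b := (List.pairwise_cons.mp hpw).1 b (by simp)
          have : (i : Int) < (s : Int) := by exact_mod_cast his
          omega
      · exact hsb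

-- firstDup returns -1 when no position repeats
theorem firstDup_none (arr : List Int) (k : Nat)
    (h : ∀ s, (hs : s < arr.length) → arr[s] ∉ arr.take s) :
    firstDup (arr.take k) (arr.drop k) = -1 := by
  by_cases hk : k < arr.length
  · rw [List.drop_eq_getElem_cons hk]
    simp only [firstDup]
    rw [if_neg (h k hk)]
    rw [firstDup_congr (arr[k] :: arr.take k) (arr.take (k + 1)) ?_ _]
    · exact firstDup_none arr (k + 1) h
    · intro y
      rw [List.take_add_one, List.getElem?_eq_getElem hk]
      simp only [Option.toList_some, List.mem_append, List.mem_cons, List.not_mem_nil, or_false]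
      exact or_comm
  · rw [List.drop_eq_nil_of_le (Nat.le_of_not_lt hk)]
    rfl
termination_by arr.length - k
decreasing_by omega

-- firstDup returns the element at the least repeat position
theorem firstDup_least (arr : List Int) (k t : Nat) (hk : k ≤ t) (ht : t < arr.length)
    (hrep : arr[t] ∈ arr.take t)
    (hleast : ∀ s, (hs : s < arr.length) → arr[s] ∈ arr.take s → t ≤ s) :
    firstDup (arr.take k) (arr.drop k) = arr[t] := by
  have hkn : k < arr.length := Nat.lt_of_le_of_lt hk ht
  rw [List.drop_eq_getElem_cons hkn]
  simp only [firstDup]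
  by_cases hmem : arr[k] ∈ arr.take k
  · rw [if_pos hmem]
    have : t ≤ k := hleast k hkn hmem
    have : k = t := Nat.le_antisymm hk this
    subst this; rfl
  · rw [if_neg hmem]
    have hkt : k ≠ t := by rintro rfl; exact hmem hrep
    rw [firstDup_congr (arr[k] :: arr.take k) (arr.take (k + 1)) ?_ _]
    · exact firstDup_least arr (k + 1) t (by omega) ht hrep hleast
    · intro y
      rw [List.take_add_one, List.getElem?_eq_getElem hkn]
      simp only [Option.toList_some, List.mem_append, List.mem_cons, List.not_mem_nil, or_false]
      exact or_comm
termination_by arr.length - k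
decreasing_by omega

-- the grouping dict of the B port, characterised
theorem positions_getD (arr : List Int) (v : Int) :
    ((PySem.List.enumerate arr 0).foldl
        (fun d p => d.modify p.2 [] (fun l => l ++ [p.1])) PySem.Dict.empty).getD v [] =
      occ arr v := by
  have hmap : ((PySem.List.enumerate arr 0).map (fun p => (p.2, p.1))).foldl
      (fun d q => d.modify q.1 [] (fun l => l ++ [q.2])) PySem.Dict.empty =
      (PySem.List.enumerate arr 0).foldl
        (fun d p => d.modify p.2 [] (fun l => l ++ [p.1])) PySem.Dict.empty :=
    List.foldl_map
  rw [← hmap, PySem.Dict.getD_foldl_modify_append]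
  unfold occ
  rw [List.filter_map, List.map_map]
  rfl

theorem positions_keys (arr : List Int) :
    ((PySem.List.enumerate arr 0).foldl
        (fun d p => d.modify p.2 [] (fun l => l ++ [p.1])) PySem.Dict.empty).keys =
      PySem.Set.ofList arr := by
  have := PySem.Dict.keys_foldl_modify_key (PySem.List.enumerate arr 0) (fun p => p.2) []
    (fun _ p l => l ++ [p.1]) PySem.Dict.empty
  rw [this]
  rw [PySem.List.map_snd_enumerate]
  exact PySem.Set.update_nil_left arr

theorem alt_eq_min_seconds (arr : List Int) :
    duplicate_char_alt arr =
      (match PySem.List.min? (secondsOf arr) (fun x => x) with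
        | none => (-1 : Int)
        | some m => (PySem.List.pyGet? arr m).getD 0) := by
  show (match PySem.List.min?
      ((((PySem.List.enumerate arr 0).foldl
          (fun d p => d.modify p.2 [] (fun l => l ++ [p.1]))
          PySem.Dict.empty).values.filter (fun idxs => decide (1 < idxs.length))).map
        (fun idxs => idxs.getD 1 0)) (fun x => x) with
    | none => (-1 : Int)
    | some m => (PySem.List.pyGet? arr m).getD 0) = _
  have hnodup : ((PySem.List.enumerate arr 0).foldl
      (fun d p => d.modify p.2 [] (fun l => l ++ [p.1])) PySem.Dict.empty).keys.Nodup :=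
    PySem.Dict.nodup_keys_foldl_modify_key (PySem.List.enumerate arr 0)
      (fun (p : Int × Int) => p.2) [] (fun _ p l => l ++ [p.1]) PySem.Dict.empty
      PySem.Dict.nodup_keys_empty
  have hvals := PySem.Dict.values_eq_map_keys _ hnodup ([] : List Int)
  rw [hvals, positions_keys]
  have : ∀ v, ((PySem.List.enumerate arr 0).foldl
      (fun d p => d.modify p.2 [] (fun l => l ++ [p.1])) PySem.Dict.empty).getD v [] =
      occ arr v := positions_getD arr
  simp only [this]
  rw [List.filter_map, List.map_map]
  rfl

-- ===== VERDICT (by name: the statement is the Claim_ definition above) =====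
theorem duplicate_char_spec : Claim_equal_duplicate_char := by
  intro arr _
  show duplicate_char arr = duplicate_char_alt arr
  have hA : duplicate_char arr = firstDup [] arr := by
    unfold duplicate_char
    apply dupLoopA_eq_firstDup
    intro x _
    rw [getD_fold_zero arr PySem.Dict.empty (by intro y; rfl)]
    simp
  rw [hA, alt_eq_min_seconds]
  cases hmin : PySem.List.min? (secondsOf arr) (fun x => x) with
  | none =>
      have hempty : secondsOf arr = [] := (PySem.List.min?_eq_none_iff _ _).mp hmin
      have hno : ∀ s, (hs : s < arr.length) → arr[s] ∉ arr.take s := by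
        intro s hs hrep
        obtain ⟨y, hy, -⟩ := repeat_seconds arr s hs hrep
        rw [hempty] at hy
        exact absurd hy (List.not_mem_nil)
      have := firstDup_none arr 0 hno
      simpa using this
  | some m =>
      obtain ⟨t, ht, rfl, hrep⟩ := seconds_repeat arr m (PySem.List.min?_mem hmin)
      have hleast : ∀ s, (hs : s < arr.length) → arr[s] ∈ arr.take s → t ≤ s := by
        intro s hs hsrep
        obtain ⟨y, hy, hys⟩ := repeat_seconds arr s hs hsrep
        have hmy : (t : Int) ≤ y := PySem.List.min?_isMin hmin y hy
        exact_mod_cast hmy.trans hys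
      have := firstDup_least arr 0 t (Nat.zero_le t) ht hrep hleast
      simp only [List.take_zero, List.drop_zero] at this
      rw [this]
      simp [PySem.List.pyGet?_natCast, List.getElem?_eq_getElem ht]
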